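-- pv_equiv track=rewrite | github.com/pc0809/Instinct | utils_ingredients_dogs.py | splitting_ingredient_panel_to_individual_ingredients
-- ===== SOURCE A (Python) =====
-- def splitting_ingredient_panel_to_individual_ingredients(flavour_wise_split_ingredients_column):
--     '''This function will split the ingredients by commas from the full ingredients panela and
--     will also do further cleaning of noises.
--     Parameters: flavour_wise_split_ingredients_column - The ingredients column generated based on the flavour
--     wise split ingredients
--     Returns: A list of lists of cleaned and splitted individual ingredients'''
--
--     ingredients_only_new=list(flavour_wise_split_ingredients_column)
--     # Tokenized ingredients in a list of list format
--     tokenized_ingredients_nested=[[ingredient.strip() for ingredient in each.split(',')] for each in ingredients_only_new]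
--
--
--     # Removing the '()' and '{}' where they may cause problems in the list.
--     #This is to keep the brackets which are necessary with the ingredient names intact and remove other brackets.
--
--     # Inconsistent use of the parantheses in the data is to be removed.
--     new_tokenized_ingredients_nested=[]
--     for ingredients in tokenized_ingredients_nested:
--         ingredients_tokenized=[]
--         for each in ingredients:
--             if '(' in each and ')' not in each:
--                 s=each.replace('(', '')
--                 ingredients_tokenized.append(s)
--             elif ')' in each and '(' not in each:
--                 s=each.replace(')', '')
--                 ingredients_tokenized.append(s)
--             else:
--                 ingredients_tokenized.append(each)
--         new_tokenized_ingredients_nested.append(ingredients_tokenized)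
--
--     # Same with curly brackets
--     new_tokenized_ingredients_nested_2=[]
--     for each in new_tokenized_ingredients_nested:
--         temp_ingredient_list=[]
--         for ingredient in each:
--             if '{' in ingredient and '}' not in ingredient:
--                 st=ingredient.replace('{', '')
--                 temp_ingredient_list.append(st)
--             elif '}' in ingredient and '{' not in ingredient:
--                 st=ingredient.replace('}', '')
--                 temp_ingredient_list.append(st)
--             else:
--                 temp_ingredient_list.append(ingredient)
--         new_tokenized_ingredients_nested_2.append(temp_ingredient_list)
--     new_tokenized_ingredients_nested_2
--
--     new_tokenized_ingredients_nested_2=[[i.replace('{', '(').replace('}', ')') for i in each] for each in new_tokenized_ingredients_nested_2]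
--
--     # Removing the unnecessary trailing fullstops
--     new_ingredients=[]
--
--     for ingredients in new_tokenized_ingredients_nested_2:
--         ingredients_tokenized=[]
--         for each in ingredients:
--             if len(each)>0 and each[-1]=='.':
--                 item=each[:-1]
--                 ingredients_tokenized.append(item)
--             # elif each[0]==':':
--             #     item=each[2:]
--             #     ingredients_tokenized.append(item)
--             else:
--                 ingredients_tokenized.append(each)
--         new_ingredients.append(ingredients_tokenized)
--
--     # Removing the 'ID' like text in the end of ingredients
--     # In some places, the ingredients contained text that was unidentifiable. For example, *Blue 2. N450118*. The *Blue 2* is a color here but the text after it is meaningless. Hence the below code removes such texts in the data.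
--     new_ingredients_split=[[i.split('.') for i in each] for each in new_ingredients]
--
--     new_ingredients_2=[]
--     for ingredients in new_ingredients_split:
--         ingredients_tokenized=[]
--         for each in ingredients:
--             if len(each)==2:
--                 if len(each[1])==8 or len(each[1])==7 or len(each[1])==10 or len(each[1])==11:
--                     ingredients_tokenized.append(each[0])
--                 else:
--                     ingredients_tokenized.append(each)
--             else:
--                 ingredients_tokenized.append(each)
--         new_ingredients_2.append(ingredients_tokenized)
--
--     # Joining again with fullstops as that was the separator for splitting for previous step
--     new_product_wise_ingredients=[]
--     for ingredient in new_ingredients_2: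
--         ingredients=[]
--         for each in ingredient:
--             if type(each)==list:
--                 ingredients.append(('.').join(each).strip())
--             else:
--                 ingredients.append(each)
--         new_product_wise_ingredients.append(ingredients)
--
--     return new_product_wise_ingredients
-- ===== SOURCE B (Python) =====
-- def splitting_ingredient_panel_to_individual_ingredients(flavour_wise_split_ingredients_column):
--     '''Character-level re-implementation: one scan per token with precomputed bracket
--     flags filters/maps characters, a trailing '.' is popped, and the ID-suffix rule is
--     decided by count('.')/find('.') arithmetic instead of split/join.'''
--     result = []
--     for panel in flavour_wise_split_ingredients_column:
--         row = []
--         for raw in panel.split(','):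
--             tok = raw.strip()
--             drop_open = '(' in tok and ')' not in tok
--             drop_close = ')' in tok and '(' not in tok
--             drop_copen = '{' in tok and '}' not in tok
--             drop_cclose = '}' in tok and '{' not in tok
--             chars = []
--             for ch in tok:
--                 if ch == '(':
--                     if not drop_open:
--                         chars.append(ch)
--                 elif ch == ')':
--                     if not drop_close:
--                         chars.append(ch)
--                 elif ch == '{':
--                     if not drop_copen:
--                         chars.append('(')
--                 elif ch == '}':
--                     if not drop_cclose:
--                         chars.append(')')
--                 else:
--                     chars.append(ch)
--             if chars and chars[-1] == '.':
--                 chars = chars[:-1]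
--             s = ''.join(chars)
--             i = s.find('.')
--             if s.count('.') == 1 and len(s) - i - 1 in (7, 8, 10, 11):
--                 row.append(s[:i])
--             else:
--                 row.append(s.strip())
--         result.append(row)
--     return result
-- ===== Notes on version B (the rewrite author's own statement) =====
-- stated objective: alternative
-- what changed: B cleans each token in one character-level scan with precomputed bracket flags (filtering/mapping chars) instead of A's six staged list-rebuilding passes of str.replace, and decides the ID-suffix rule by count('.')/find('.') index arithmetic instead of A's split('.') / '.'.join round-trip.
import Mathlib
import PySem

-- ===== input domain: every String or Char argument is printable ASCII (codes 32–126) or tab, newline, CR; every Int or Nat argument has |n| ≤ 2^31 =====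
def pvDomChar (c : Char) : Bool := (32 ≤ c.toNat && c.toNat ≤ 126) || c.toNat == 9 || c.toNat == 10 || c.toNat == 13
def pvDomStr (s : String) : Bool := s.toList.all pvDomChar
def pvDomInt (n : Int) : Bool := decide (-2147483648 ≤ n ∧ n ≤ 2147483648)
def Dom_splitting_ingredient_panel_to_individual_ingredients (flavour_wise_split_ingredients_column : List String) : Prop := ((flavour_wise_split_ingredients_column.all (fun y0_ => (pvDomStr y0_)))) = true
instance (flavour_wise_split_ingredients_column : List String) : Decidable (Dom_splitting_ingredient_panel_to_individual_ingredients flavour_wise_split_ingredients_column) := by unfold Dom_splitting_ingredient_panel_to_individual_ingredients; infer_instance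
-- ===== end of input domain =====

-- B cleans each token in ONE character-level scan with precomputed bracket flags (filtering/
-- mapping single chars) instead of A's staged str.replace passes, and decides the ID-suffix rule
-- by count('.')/find('.') index arithmetic instead of A's split('.') / '.'.join round-trip.


-- ===== PORT A =====
def splitting_ingredient_panel_to_individual_ingredients (flavour_wise_split_ingredients_column : List String) : List (List String) :=
  let ingredients_only_new := flavour_wise_split_ingredients_column
  let tokenized_ingredients_nested :=
    ingredients_only_new.map (fun each =>
      ((PySem.Str.split? each ",").getD []).map (fun ingredient => PySem.Str.strip ingredient))
  let new_tokenized_ingredients_nested :=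
    tokenized_ingredients_nested.foldl (fun acc ingredients =>
      acc ++ [ingredients.foldl (fun ingredients_tokenized each =>
        if PySem.Str.isIn "(" each && !PySem.Str.isIn ")" each then
          ingredients_tokenized ++ [PySem.Str.replace each "(" ""]
        else if PySem.Str.isIn ")" each && !PySem.Str.isIn "(" each then
          ingredients_tokenized ++ [PySem.Str.replace each ")" ""]
        else ingredients_tokenized ++ [each]) []]) []
  let new_tokenized_ingredients_nested_2 :=
    new_tokenized_ingredients_nested.foldl (fun acc each =>
      acc ++ [each.foldl (fun temp_ingredient_list ingredient =>
        if PySem.Str.isIn "{" ingredient && !PySem.Str.isIn "}" ingredient then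
          temp_ingredient_list ++ [PySem.Str.replace ingredient "{" ""]
        else if PySem.Str.isIn "}" ingredient && !PySem.Str.isIn "{" ingredient then
          temp_ingredient_list ++ [PySem.Str.replace ingredient "}" ""]
        else temp_ingredient_list ++ [ingredient]) []]) []
  let new_tokenized_ingredients_nested_2 :=
    new_tokenized_ingredients_nested_2.map (fun each =>
      each.map (fun i => PySem.Str.replace (PySem.Str.replace i "{" "(") "}" ")"))
  let new_ingredients :=
    new_tokenized_ingredients_nested_2.foldl (fun acc ingredients =>
      acc ++ [ingredients.foldl (fun ingredients_tokenized each =>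
        if decide (0 < PySem.Str.len each) && (PySem.Str.pyGet? each (-1) == some '.') then
          ingredients_tokenized ++ [PySem.Str.slice each none (some (-1))]
        else ingredients_tokenized ++ [each]) []]) []
  let new_ingredients_split :=
    new_ingredients.map (fun each => each.map (fun i => (PySem.Str.split? i ".").getD []))
  let new_ingredients_2 :=
    new_ingredients_split.foldl (fun acc ingredients =>
      acc ++ [ingredients.foldl (fun ingredients_tokenized each =>
        if each.length == 2 then
          if PySem.Str.len ((PySem.List.pyGet? each 1).getD "") == 8 ||
             PySem.Str.len ((PySem.List.pyGet? each 1).getD "") == 7 ||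
             PySem.Str.len ((PySem.List.pyGet? each 1).getD "") == 10 ||
             PySem.Str.len ((PySem.List.pyGet? each 1).getD "") == 11 then
            ingredients_tokenized ++ [Sum.inl ((PySem.List.pyGet? each 0).getD "")]
          else ingredients_tokenized ++ [(Sum.inr each : String ⊕ List String)]
        else ingredients_tokenized ++ [(Sum.inr each : String ⊕ List String)]) []]) []
  new_ingredients_2.foldl (fun acc ingredient =>
    acc ++ [ingredient.foldl (fun ingredients each =>
      match each with
      | Sum.inr l => ingredients ++ [PySem.Str.strip (PySem.Str.join "." l)]
      | Sum.inl s => ingredients ++ [s]) []]) []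

-- ===== PORT B =====
-- B's per-token cleaning: one char scan with precomputed flags, pop of a trailing '.',
-- then count('.')/find('.') arithmetic for the ID-suffix rule.
def pvCleanTok (tok : String) : String :=
  let drop_open := PySem.Str.isIn "(" tok && !PySem.Str.isIn ")" tok
  let drop_close := PySem.Str.isIn ")" tok && !PySem.Str.isIn "(" tok
  let drop_copen := PySem.Str.isIn "{" tok && !PySem.Str.isIn "}" tok
  let drop_cclose := PySem.Str.isIn "}" tok && !PySem.Str.isIn "{" tok
  let chars := tok.toList.foldl (fun acc ch =>
    if ch == '(' then (if drop_open then acc else acc ++ [ch])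
    else if ch == ')' then (if drop_close then acc else acc ++ [ch])
    else if ch == '{' then (if drop_copen then acc else acc ++ ['('])
    else if ch == '}' then (if drop_cclose then acc else acc ++ [')'])
    else acc ++ [ch]) []
  let chars := if decide (0 < PySem.List.len chars) && (PySem.List.pyGet? chars (-1) == some '.')
    then PySem.List.slice chars none (some (-1)) else chars
  let s : String := String.ofList chars   -- ''.join over kept single characters (exact)
  let i := PySem.Str.find s "."
  if (PySem.Str.count s "." == 1) &&
     ((PySem.Str.len s - i - 1 == 7) || (PySem.Str.len s - i - 1 == 8) ||
      (PySem.Str.len s - i - 1 == 10) || (PySem.Str.len s - i - 1 == 11)) then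
    PySem.Str.slice s none (some i)
  else PySem.Str.strip s

def splitting_ingredient_panel_to_individual_ingredients_alt (flavour_wise_split_ingredients_column : List String) : List (List String) :=
  flavour_wise_split_ingredients_column.foldl (fun result panel =>
    result ++ [((PySem.Str.split? panel ",").getD []).foldl (fun row raw =>
      row ++ [pvCleanTok (PySem.Str.strip raw)]) []]) []

-- ===== PRECONDITION & SPEC =====
def Spec_splitting_ingredient_panel_to_individual_ingredients (flavour_wise_split_ingredients_column : List String) (out : List (List String)) : Prop := out = splitting_ingredient_panel_to_individual_ingredients_alt flavour_wise_split_ingredients_column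
instance (flavour_wise_split_ingredients_column : List String) (out : List (List String)) : Decidable (Spec_splitting_ingredient_panel_to_individual_ingredients flavour_wise_split_ingredients_column out) := by unfold Spec_splitting_ingredient_panel_to_individual_ingredients; infer_instance

-- ===== CLAIM (what is proved, stated in full; the proofs are below) =====
def Claim_equal_splitting_ingredient_panel_to_individual_ingredients : Prop := ∀ (flavour_wise_split_ingredients_column : List String), Dom_splitting_ingredient_panel_to_individual_ingredients flavour_wise_split_ingredients_column → Spec_splitting_ingredient_panel_to_individual_ingredients flavour_wise_split_ingredients_column (splitting_ingredient_panel_to_individual_ingredients flavour_wise_split_ingredients_column)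

-- ===== LEMMAS AND PROOFS =====

-- A's per-token pass functions (proof-only names for the bodies of A's inner loops)
def pvA1 (each : String) : String :=
  if PySem.Str.isIn "(" each && !PySem.Str.isIn ")" each then PySem.Str.replace each "(" ""
  else if PySem.Str.isIn ")" each && !PySem.Str.isIn "(" each then PySem.Str.replace each ")" ""
  else each

def pvA2 (ingredient : String) : String :=
  if PySem.Str.isIn "{" ingredient && !PySem.Str.isIn "}" ingredient then PySem.Str.replace ingredient "{" ""
  else if PySem.Str.isIn "}" ingredient && !PySem.Str.isIn "{" ingredient then PySem.Str.replace ingredient "}" ""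
  else ingredient

def pvA4 (each : String) : String :=
  if decide (0 < PySem.Str.len each) && (PySem.Str.pyGet? each (-1) == some '.') then
    PySem.Str.slice each none (some (-1))
  else each

def pvA6 (each : List String) : String ⊕ List String :=
  if each.length == 2 then
    if PySem.Str.len ((PySem.List.pyGet? each 1).getD "") == 8 ||
       PySem.Str.len ((PySem.List.pyGet? each 1).getD "") == 7 ||
       PySem.Str.len ((PySem.List.pyGet? each 1).getD "") == 10 ||
       PySem.Str.len ((PySem.List.pyGet? each 1).getD "") == 11 then
      Sum.inl ((PySem.List.pyGet? each 0).getD "")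
    else Sum.inr each
  else Sum.inr each

def pvA7 (each : String ⊕ List String) : String :=
  match each with
  | Sum.inr l => PySem.Str.strip (PySem.Str.join "." l)
  | Sum.inl s => s

-- inner-loop shapes: each of A's appending inner loops is a map of its per-token function
theorem pvPass1 (l : List String) (acc : List String) :
    l.foldl (fun ingredients_tokenized each =>
        if PySem.Str.isIn "(" each && !PySem.Str.isIn ")" each then
          ingredients_tokenized ++ [PySem.Str.replace each "(" ""]
        else if PySem.Str.isIn ")" each && !PySem.Str.isIn "(" each then
          ingredients_tokenized ++ [PySem.Str.replace each ")" ""]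
        else ingredients_tokenized ++ [each]) acc = acc ++ l.map pvA1 := by
  induction l generalizing acc with
  | nil => simp
  | cons x xs ih =>
    simp only [List.foldl_cons, ih, List.map_cons]
    unfold pvA1
    split_ifs <;> simp

theorem pvPass2 (l : List String) (acc : List String) :
    l.foldl (fun temp_ingredient_list ingredient =>
        if PySem.Str.isIn "{" ingredient && !PySem.Str.isIn "}" ingredient then
          temp_ingredient_list ++ [PySem.Str.replace ingredient "{" ""]
        else if PySem.Str.isIn "}" ingredient && !PySem.Str.isIn "{" ingredient then
          temp_ingredient_list ++ [PySem.Str.replace ingredient "}" ""]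
        else temp_ingredient_list ++ [ingredient]) acc = acc ++ l.map pvA2 := by
  induction l generalizing acc with
  | nil => simp
  | cons x xs ih =>
    simp only [List.foldl_cons, ih, List.map_cons]
    unfold pvA2
    split_ifs <;> simp

theorem pvPass4 (l : List String) (acc : List String) :
    l.foldl (fun ingredients_tokenized each =>
        if decide (0 < PySem.Str.len each) && (PySem.Str.pyGet? each (-1) == some '.') then
          ingredients_tokenized ++ [PySem.Str.slice each none (some (-1))]
        else ingredients_tokenized ++ [each]) acc = acc ++ l.map pvA4 := by
  induction l generalizing acc with
  | nil => simp
  | cons x xs ih =>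
    simp only [List.foldl_cons, ih, List.map_cons]
    unfold pvA4
    split_ifs <;> simp

theorem pvPass6 (l : List (List String)) (acc : List (String ⊕ List String)) :
    l.foldl (fun ingredients_tokenized each =>
        if each.length == 2 then
          if PySem.Str.len ((PySem.List.pyGet? each 1).getD "") == 8 ||
             PySem.Str.len ((PySem.List.pyGet? each 1).getD "") == 7 ||
             PySem.Str.len ((PySem.List.pyGet? each 1).getD "") == 10 ||
             PySem.Str.len ((PySem.List.pyGet? each 1).getD "") == 11 then
            ingredients_tokenized ++ [Sum.inl ((PySem.List.pyGet? each 0).getD "")]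
          else ingredients_tokenized ++ [(Sum.inr each : String ⊕ List String)]
        else ingredients_tokenized ++ [(Sum.inr each : String ⊕ List String)]) acc = acc ++ l.map pvA6 := by
  induction l generalizing acc with
  | nil => simp
  | cons x xs ih =>
    simp only [List.foldl_cons, ih, List.map_cons]
    unfold pvA6
    split_ifs <;> simp

theorem pvPass7 (l : List (String ⊕ List String)) (acc : List String) :
    l.foldl (fun ingredients each =>
        match each with
        | Sum.inr lst => ingredients ++ [PySem.Str.strip (PySem.Str.join "." lst)]
        | Sum.inl s => ingredients ++ [s]) acc = acc ++ l.map pvA7 := by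
  induction l generalizing acc with
  | nil => simp
  | cons x xs ih =>
    simp only [List.foldl_cons, ih, List.map_cons]
    cases x <;> simp [pvA7]

-- ---------- character-level facts ----------

-- single-character replace is a flatMap
theorem pvReplGo (x : Char) (new : List Char) :
    ∀ (fuel : Nat) (l acc : List Char), l.length ≤ fuel →
      PySem.Chars.replace.go [x] new fuel l acc =
        acc.reverse ++ l.flatMap (fun c => if c = x then new else [c]) := by
  intro fuel
  induction fuel with
  | zero =>
    intro l acc h
    have : l = [] := by cases l <;> simp_all
    subst this
    simp [PySem.Chars.replace.go]
  | succ f ih =>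
    intro l acc h
    cases l with
    | nil => simp [PySem.Chars.replace.go]
    | cons c t =>
      show (if List.isPrefixOf [x] (c :: t) = true then
          PySem.Chars.replace.go [x] new f (List.drop [x].length (c :: t)) (new.reverse ++ acc)
        else PySem.Chars.replace.go [x] new f t (c :: acc)) = _
      have hlen : t.length ≤ f := by simp at h; omega
      have hdrop : List.drop [x].length (c :: t) = t := by simp
      by_cases hc : c = x
      · rw [if_pos (by simp [List.isPrefixOf, hc]), hdrop]
        rw [ih _ _ hlen]
        simp [hc]
      · rw [if_neg (by simp [List.isPrefixOf]; exact fun hx => hc hx.symm)]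
        rw [ih _ _ hlen]
        simp [hc]

theorem pvRepl (cs : List Char) (x : Char) (new : List Char) :
    PySem.Chars.replace cs [x] new = cs.flatMap (fun c => if c = x then new else [c]) := by
  unfold PySem.Chars.replace
  rw [if_neg (by simp)]
  rw [pvReplGo x new cs.length cs [] le_rfl]
  simp

-- a singleton list is an infix exactly when its character is a member
theorem pvSingletonInfix (c : Char) (l : List Char) : [c] <:+: l ↔ c ∈ l := by
  constructor
  · rintro ⟨s, t, h⟩
    rw [← h]
    simp
  · intro h
    obtain ⟨s, t, rfl⟩ := List.append_of_mem h
    exact ⟨s, t, by simp⟩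

-- 'c in s' for a single character is list membership
theorem pvIsInMem (c : Char) (l : List Char) : PySem.Chars.isIn [c] l = decide (c ∈ l) := by
  by_cases hm : c ∈ l
  · simp only [hm, decide_true]
    exact (PySem.Chars.isIn_iff_infix _ _).mpr ((pvSingletonInfix c l).mpr hm)
  · simp only [hm, decide_false]
    exact (PySem.Chars.isIn_eq_false_iff _ _).mpr (fun hinf => hm ((pvSingletonInfix c l).mp hinf))

-- membership through a delete/substitute flatMap, for a character it never touches
theorem pvMemFlatMapIf (c x : Char) (new : List Char) (hne : c ≠ x) (hnew : c ∉ new)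
    (l : List Char) : (c ∈ l.flatMap (fun ch => if ch = x then new else [ch])) ↔ c ∈ l := by
  simp only [List.mem_flatMap]
  constructor
  · rintro ⟨a, ha, hc⟩
    by_cases hax : a = x
    · rw [if_pos hax] at hc; exact absurd hc hnew
    · rw [if_neg hax] at hc; simp at hc; subst hc; exact ha
  · intro hc
    exact ⟨c, hc, by rw [if_neg hne]; simp⟩

-- membership through A's first (parenthesis) stage, for non-parenthesis characters
theorem pvMemH1 (c : Char) (hc1 : c ≠ '(') (hc2 : c ≠ ')') (l : List Char) (dO dC : Bool) :
    (c ∈ l.flatMap (fun ch =>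
        if dO = true then (if ch = '(' then [] else [ch])
        else if dC = true then (if ch = ')' then [] else [ch])
        else [ch])) ↔ c ∈ l := by
  cases dO with
  | true => simpa using pvMemFlatMapIf c '(' [] hc1 (by simp) l
  | false =>
    cases dC with
    | true => simpa using pvMemFlatMapIf c ')' [] hc2 (by simp) l
    | false => simp

-- B's per-character rule
def pvG (dO dC dCO dCC : Bool) (ch : Char) : List Char :=
  if ch == '(' then (if dO then [] else [ch])
  else if ch == ')' then (if dC then [] else [ch])
  else if ch == '{' then (if dCO then [] else ['('])
  else if ch == '}' then (if dCC then [] else [')'])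
  else [ch]

-- B's scanning loop is the flatMap of pvG
set_option maxHeartbeats 1000000 in
theorem pvScan (dO dC dCO dCC : Bool) (l acc : List Char) :
    l.foldl (fun acc ch =>
      if ch == '(' then (if dO then acc else acc ++ [ch])
      else if ch == ')' then (if dC then acc else acc ++ [ch])
      else if ch == '{' then (if dCO then acc else acc ++ ['('])
      else if ch == '}' then (if dCC then acc else acc ++ [')'])
      else acc ++ [ch]) acc = acc ++ l.flatMap (pvG dO dC dCO dCC) := by
  induction l generalizing acc with
  | nil => simp
  | cons x xs ih =>
    simp only [List.foldl_cons, ih, List.flatMap_cons]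
    unfold pvG
    split_ifs <;> simp

-- the composed per-character effect of A's four replace stages
theorem pvPointwise (dO dC dCO dCC : Bool) (c : Char)
    (h1 : dO = true → c ≠ ')') (h2 : dC = true → c ≠ '(')
    (h3 : dCO = true → c ≠ '}') (h4 : dCC = true → c ≠ '{') :
    (List.flatMap (fun x =>
        List.flatMap (fun y =>
            List.flatMap (fun z => if z = '}' then [')'] else [z])
              (if y = '{' then ['('] else [y]))
          (if dCO = true then (if x = '{' then ([] : List Char) else [x])
            else if dCC = true then (if x = '}' then [] else [x]) else [x]))
      (if dO = true then (if c = '(' then ([] : List Char) else [c])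
        else if dC = true then (if c = ')' then [] else [c]) else [c])) = pvG dO dC dCO dCC c := by
  by_cases hc1 : c = '('
  · subst hc1
    have hdC : dC = false := by
      cases dC with | false => rfl | true => exact absurd rfl (h2 rfl)
    cases dO <;> simp [pvG, hdC]
  · by_cases hc2 : c = ')'
    · subst hc2
      have hdO : dO = false := by
        cases dO with | false => rfl | true => exact absurd rfl (h1 rfl)
      cases dC <;> simp [pvG, hdO]
    · by_cases hc3 : c = '{'
      · subst hc3
        have hdCC : dCC = false := by
          cases dCC with | false => rfl | true => exact absurd rfl (h4 rfl)
        cases dCO <;> simp [pvG, hdCC]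
      · by_cases hc4 : c = '}'
        · subst hc4
          have hdCO : dCO = false := by
            cases dCO with | false => rfl | true => exact absurd rfl (h3 rfl)
          cases dCC <;> simp [pvG, hdCO]
        · simp [pvG, hc1, hc2, hc3, hc4]

-- all four of A's bracket stages at once, character level
theorem pvStages (t : String) :
    (PySem.Str.replace (PySem.Str.replace (pvA2 (pvA1 t)) "{" "(") "}" ")").toList =
      t.toList.flatMap (pvG (PySem.Str.isIn "(" t && !PySem.Str.isIn ")" t)
                            (PySem.Str.isIn ")" t && !PySem.Str.isIn "(" t)
                            (PySem.Str.isIn "{" t && !PySem.Str.isIn "}" t)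
                            (PySem.Str.isIn "}" t && !PySem.Str.isIn "{" t)) := by
  -- stage 1 as a flatMap over t.toList
  have e1 : (pvA1 t).toList =
      t.toList.flatMap (fun c =>
        if (PySem.Str.isIn "(" t && !PySem.Str.isIn ")" t) = true then (if c = '(' then [] else [c])
        else if (PySem.Str.isIn ")" t && !PySem.Str.isIn "(" t) = true then (if c = ')' then [] else [c])
        else [c]) := by
    unfold pvA1
    split_ifs with hA hB
    · rw [PySem.Str.toList_replace]
      rw [show PySem.Chars.replace t.toList "(".toList "".toList =
          PySem.Chars.replace t.toList ['('] [] from rfl, pvRepl]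
    · rw [PySem.Str.toList_replace]
      rw [show PySem.Chars.replace t.toList ")".toList "".toList =
          PySem.Chars.replace t.toList [')'] [] from rfl, pvRepl]
    · simp
  -- curly membership is unchanged by stage 1
  have mco : PySem.Str.isIn "{" (pvA1 t) = PySem.Str.isIn "{" t := by
    rw [PySem.Str.isIn_eq, PySem.Str.isIn_eq]
    show PySem.Chars.isIn ['{'] (pvA1 t).toList = PySem.Chars.isIn ['{'] t.toList
    rw [pvIsInMem, pvIsInMem, e1]
    simp only [decide_eq_decide]
    exact pvMemH1 '{' (by decide) (by decide) t.toList _ _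
  have mcc : PySem.Str.isIn "}" (pvA1 t) = PySem.Str.isIn "}" t := by
    rw [PySem.Str.isIn_eq, PySem.Str.isIn_eq]
    show PySem.Chars.isIn ['}'] (pvA1 t).toList = PySem.Chars.isIn ['}'] t.toList
    rw [pvIsInMem, pvIsInMem, e1]
    simp only [decide_eq_decide]
    exact pvMemH1 '}' (by decide) (by decide) t.toList _ _
  -- stage 2 as a flatMap over (pvA1 t).toList
  have e2 : (pvA2 (pvA1 t)).toList =
      (pvA1 t).toList.flatMap (fun c =>
        if (PySem.Str.isIn "{" t && !PySem.Str.isIn "}" t) = true then (if c = '{' then [] else [c])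
        else if (PySem.Str.isIn "}" t && !PySem.Str.isIn "{" t) = true then (if c = '}' then [] else [c])
        else [c]) := by
    unfold pvA2
    rw [mco, mcc]
    split_ifs with hA hB
    · rw [PySem.Str.toList_replace]
      rw [show PySem.Chars.replace (pvA1 t).toList "{".toList "".toList =
          PySem.Chars.replace (pvA1 t).toList ['{'] [] from rfl, pvRepl]
    · rw [PySem.Str.toList_replace]
      rw [show PySem.Chars.replace (pvA1 t).toList "}".toList "".toList =
          PySem.Chars.replace (pvA1 t).toList ['}'] [] from rfl, pvRepl]
    · simp
  -- stages 3 and 4 (the substitutions) and assemble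
  rw [PySem.Str.toList_replace]
  rw [show PySem.Chars.replace (PySem.Str.replace (pvA2 (pvA1 t)) "{" "(").toList "}".toList ")".toList =
      PySem.Chars.replace (PySem.Str.replace (pvA2 (pvA1 t)) "{" "(").toList ['}'] [')'] from rfl]
  rw [pvRepl, PySem.Str.toList_replace]
  rw [show PySem.Chars.replace (pvA2 (pvA1 t)).toList "{".toList "(".toList =
      PySem.Chars.replace (pvA2 (pvA1 t)).toList ['{'] ['('] from rfl]
  rw [pvRepl, e2, e1]
  rw [List.flatMap_assoc, List.flatMap_assoc, List.flatMap_assoc]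
  apply List.flatMap_congr
  intro c hc
  apply pvPointwise
  · intro hO hcc
    subst hcc
    have h2' : PySem.Str.isIn ")" t = false := by
      simp only [Bool.and_eq_true, Bool.not_eq_true'] at hO
      exact hO.2
    rw [PySem.Str.isIn_eq] at h2'
    have h3' : PySem.Chars.isIn [')'] t.toList = false := h2'
    rw [pvIsInMem] at h3'
    simp only [decide_eq_false_iff_not] at h3'
    exact h3' hc
  · intro hO hcc
    subst hcc
    have h2' : PySem.Str.isIn "(" t = false := by
      simp only [Bool.and_eq_true, Bool.not_eq_true'] at hO
      exact hO.2
    rw [PySem.Str.isIn_eq] at h2'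
    have h3' : PySem.Chars.isIn ['('] t.toList = false := h2'
    rw [pvIsInMem] at h3'
    simp only [decide_eq_false_iff_not] at h3'
    exact h3' hc
  · intro hO hcc
    subst hcc
    have h2' : PySem.Str.isIn "}" t = false := by
      simp only [Bool.and_eq_true, Bool.not_eq_true'] at hO
      exact hO.2
    rw [PySem.Str.isIn_eq] at h2'
    have h3' : PySem.Chars.isIn ['}'] t.toList = false := h2'
    rw [pvIsInMem] at h3'
    simp only [decide_eq_false_iff_not] at h3'
    exact h3' hc
  · intro hO hcc
    subst hcc
    have h2' : PySem.Str.isIn "{" t = false := by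
      simp only [Bool.and_eq_true, Bool.not_eq_true'] at hO
      exact hO.2
    rw [PySem.Str.isIn_eq] at h2'
    have h3' : PySem.Chars.isIn ['{'] t.toList = false := h2'
    rw [pvIsInMem] at h3'
    simp only [decide_eq_false_iff_not] at h3'
    exact h3' hc

-- ---------- split/count/find facts for the single-character separator '.' ----------

-- direct recursion computing s.split('.')
def pvSplitD : List Char → List (List Char)
  | [] => [[]]
  | c :: t =>
      if c = '.' then [] :: pvSplitD t
      else
        match pvSplitD t with
        | [] => [[c]]
        | h :: r => (c :: h) :: r

theorem pvSplitD_ne_nil (l : List Char) : pvSplitD l ≠ [] := by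
  cases l with
  | nil => simp [pvSplitD]
  | cons c t =>
    unfold pvSplitD
    split_ifs
    · simp
    · cases h : pvSplitD t <;> simp

theorem pvSplitGo : ∀ (fuel : Nat) (l cur : List Char) (acc : List (List Char))
    (hd : List Char) (tl : List (List Char)), l.length < fuel → pvSplitD l = hd :: tl →
    PySem.Chars.splitOn.go ['.'] fuel l cur acc = acc.reverse ++ (cur.reverse ++ hd) :: tl := by
  intro fuel
  induction fuel with
  | zero => intro l cur acc hd tl h _; omega
  | succ f ih =>
    intro l cur acc hd tl h hs
    cases l with
    | nil =>
      show (cur.reverse :: acc).reverse = _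
      simp [pvSplitD] at hs
      simp [hs.1.symm, hs.2.symm]
    | cons c rest =>
      show (if List.isPrefixOf ['.'] (c :: rest) = true then
          PySem.Chars.splitOn.go ['.'] f (List.drop ['.'].length (c :: rest)) [] (cur.reverse :: acc)
        else PySem.Chars.splitOn.go ['.'] f rest (c :: cur) acc) = _
      have hlen : rest.length < f := by simp at h; omega
      obtain ⟨hd', tl', hrec⟩ : ∃ hd' tl', pvSplitD rest = hd' :: tl' := by
        cases hx : pvSplitD rest with
        | nil => exact absurd hx (pvSplitD_ne_nil rest)
        | cons a b => exact ⟨a, b, rfl⟩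
      have hdrop : List.drop ['.'].length (c :: rest) = rest := by simp
      by_cases hc : c = '.'
      · rw [if_pos (by simp [List.isPrefixOf, hc]), hdrop]
        unfold pvSplitD at hs
        rw [if_pos hc, hrec] at hs
        cases hs
        rw [ih _ _ _ _ _ hlen hrec]
        simp
      · rw [if_neg (by simp [List.isPrefixOf]; exact fun hx => hc hx.symm)]
        unfold pvSplitD at hs
        rw [if_neg hc, hrec] at hs
        cases hs
        rw [ih _ _ _ _ _ hlen hrec]
        simp

theorem pvSplitOn (l : List Char) : PySem.Chars.splitOn l ['.'] = pvSplitD l := by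
  obtain ⟨hd, tl, hrec⟩ : ∃ hd tl, pvSplitD l = hd :: tl := by
    cases hx : pvSplitD l with
    | nil => exact absurd hx (pvSplitD_ne_nil l)
    | cons a b => exact ⟨a, b, rfl⟩
  unfold PySem.Chars.splitOn
  rw [pvSplitGo (l.length + 1) l [] [] hd tl (by omega) hrec, hrec]
  simp

theorem pvSplitD_length (l : List Char) : (pvSplitD l).length = l.count '.' + 1 := by
  induction l with
  | nil => simp [pvSplitD]
  | cons c t ih =>
    unfold pvSplitD
    obtain ⟨hd, tl, hrec⟩ : ∃ hd tl, pvSplitD t = hd :: tl := by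
      cases hx : pvSplitD t with
      | nil => exact absurd hx (pvSplitD_ne_nil t)
      | cons a b => exact ⟨a, b, rfl⟩
    by_cases hc : c = '.'
    · rw [if_pos hc]
      simp [hc, ih]
    · rw [if_neg hc, hrec]
      rw [hrec] at ih
      simp only [List.length_cons] at ih ⊢
      simp [hc, ih]

theorem pvSplitD_head (l : List Char) (hd : List Char) (tl : List (List Char))
    (h : pvSplitD l = hd :: tl) : hd = l.takeWhile (· ≠ '.') := by
  induction l generalizing hd tl with
  | nil =>
    simp [pvSplitD] at h
    rw [h.1]
    simp
  | cons c t ih =>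
    unfold pvSplitD at h
    by_cases hc : c = '.'
    · rw [if_pos hc] at h
      have hh : hd = [] := by injection h with h1 h2; exact h1.symm
      rw [hh]
      simp [hc, List.takeWhile]
    · rw [if_neg hc] at h
      obtain ⟨hd', tl', hrec⟩ : ∃ hd' tl', pvSplitD t = hd' :: tl' := by
        cases hx : pvSplitD t with
        | nil => exact absurd hx (pvSplitD_ne_nil t)
        | cons a b => exact ⟨a, b, rfl⟩
      rw [hrec] at h
      have hh : hd = c :: hd' := by injection h with h1 h2; exact h1.symm
      rw [hh]
      simp [List.takeWhile, hc]
      simpa using ih hd' tl' hrec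

theorem pvJoinSplitD (l : List Char) : PySem.Chars.join ['.'] (pvSplitD l) = l := by
  induction l with
  | nil => simp [pvSplitD, PySem.Chars.join, List.intercalate]
  | cons c t ih =>
    unfold pvSplitD
    obtain ⟨hd, tl, hrec⟩ : ∃ hd tl, pvSplitD t = hd :: tl := by
      cases hx : pvSplitD t with
      | nil => exact absurd hx (pvSplitD_ne_nil t)
      | cons a b => exact ⟨a, b, rfl⟩
    rw [hrec] at ih
    by_cases hc : c = '.'
    · rw [if_pos hc, hrec]
      rw [PySem.Chars.join_cons_cons, ih]
      simp [hc]
    · rw [if_neg hc, hrec]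
      cases tl with
      | nil =>
        simp only [PySem.Chars.join_singleton] at ih ⊢
        rw [ih]
      | cons b r =>
        rw [PySem.Chars.join_cons_cons] at ih ⊢
        rw [← ih]
        simp

theorem pvCountGo : ∀ (fuel : Nat) (l : List Char) (acc : Nat), l.length ≤ fuel →
    PySem.Chars.count.go ['.'] fuel l acc = acc + l.count '.' := by
  intro fuel
  induction fuel with
  | zero =>
    intro l acc h
    have : l = [] := by cases l <;> simp_all
    subst this
    simp [PySem.Chars.count.go]
  | succ f ih =>
    intro l acc h
    cases l with
    | nil => simp [PySem.Chars.count.go]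
    | cons c t =>
      show (if List.isPrefixOf ['.'] (c :: t) = true then
          PySem.Chars.count.go ['.'] f (List.drop ['.'].length (c :: t)) (acc + 1)
        else PySem.Chars.count.go ['.'] f t acc) = _
      have hlen : t.length ≤ f := by simp at h; omega
      have hdrop : List.drop ['.'].length (c :: t) = t := by simp
      by_cases hc : c = '.'
      · rw [if_pos (by simp [List.isPrefixOf, hc]), hdrop]
        rw [ih _ _ hlen]
        simp [hc]
        omega
      · rw [if_neg (by simp [List.isPrefixOf]; exact fun hx => hc hx.symm)]
        rw [ih _ _ hlen]
        simp [hc]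

theorem pvCountDot (l : List Char) : PySem.Chars.count l ['.'] = l.count '.' := by
  unfold PySem.Chars.count
  rw [if_neg (by simp)]
  rw [pvCountGo l.length l 0 le_rfl]
  omega

theorem pvFindGo : ∀ (l : List Char) (k : Nat),
    PySem.Chars.find.go ['.'] l k =
      if '.' ∈ l then ((k : Int) + (l.takeWhile (· ≠ '.')).length) else -1 := by
  intro l
  induction l with
  | nil => intro k; simp [PySem.Chars.find.go]
  | cons c t ih =>
    intro k
    show (if List.isPrefixOf ['.'] (c :: t) = true then ((k : Int))
      else PySem.Chars.find.go ['.'] t (k + 1)) = _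
    by_cases hc : c = '.'
    · rw [if_pos (by simp [List.isPrefixOf, hc])]
      simp [hc, List.takeWhile]
    · rw [if_neg (by simp [List.isPrefixOf]; exact fun hx => hc hx.symm)]
      rw [ih (k + 1)]
      by_cases hm : '.' ∈ t
      · rw [if_pos hm, if_pos (by simp [hm])]
        simp [List.takeWhile, hc]
        ring
      · rw [if_neg hm, if_neg (by simp [hm]; exact fun hx => hc hx.symm)]

theorem pvFindDot (l : List Char) :
    PySem.Chars.find l ['.'] = if '.' ∈ l then (((l.takeWhile (· ≠ '.')).length : Int)) else -1 := by
  unfold PySem.Chars.find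
  rw [pvFindGo l 0]
  simp

-- the ID-suffix rule: A's split/join form equals B's count/find arithmetic, for any string
theorem pvIdRule (s : String) :
    pvA7 (pvA6 ((PySem.Str.split? s ".").getD [])) =
      (if (PySem.Str.count s "." == 1) &&
          ((PySem.Str.len s - PySem.Str.find s "." - 1 == 7) ||
           (PySem.Str.len s - PySem.Str.find s "." - 1 == 8) ||
           (PySem.Str.len s - PySem.Str.find s "." - 1 == 10) ||
           (PySem.Str.len s - PySem.Str.find s "." - 1 == 11)) then
        PySem.Str.slice s none (some (PySem.Str.find s "."))
      else PySem.Str.strip s) := by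
  have hm := PySem.Str.split?_map s "."
  cases hp : PySem.Str.split? s "." with
  | none => rw [hp] at hm; simp [PySem.Chars.split?] at hm
  | some parts =>
    rw [hp] at hm
    simp only [Option.map_some, PySem.Chars.split?] at hm
    have hparts : parts.map String.toList = pvSplitD s.toList := by
      rw [← pvSplitOn]
      simpa using hm
    have hjoin : PySem.Str.join "." parts = s := by
      apply String.toList_injective
      rw [PySem.Str.toList_join]
      rw [show ("." : String).toList = ['.'] from rfl, hparts, pvJoinSplitD]
    have hcnt : PySem.Str.count s "." = s.toList.count '.' := by
      rw [PySem.Str.count_eq]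
      exact pvCountDot s.toList
    simp only [Option.getD_some]
    by_cases h1 : s.toList.count '.' = 1
    · -- exactly one dot: parts = [p0, p1]
      have hlen2 : parts.length = 2 := by
        have h := congrArg List.length hparts
        rw [pvSplitD_length] at h
        simp at h
        omega
      obtain ⟨p0, p1, hps⟩ : ∃ p0 p1, parts = [p0, p1] := by
        cases parts with
        | nil => simp at hlen2
        | cons a u =>
          cases u with
          | nil => simp at hlen2
          | cons b v =>
            cases v with
            | nil => exact ⟨a, b, rfl⟩
            | cons _ _ => simp at hlen2
      subst hps
      have hsplit : pvSplitD s.toList = [p0.toList, p1.toList] := by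
        rw [← hparts]; simp
      have hhd : p0.toList = s.toList.takeWhile (· ≠ '.') :=
        pvSplitD_head s.toList p0.toList [p1.toList] hsplit
      have hcs : s.toList = p0.toList ++ '.' :: p1.toList := by
        have hj := pvJoinSplitD s.toList
        rw [hsplit, PySem.Chars.join_cons_cons, PySem.Chars.join_singleton] at hj
        rw [← hj]
        simp
      have hdotmem : '.' ∈ s.toList := by rw [hcs]; simp
      have hfind : PySem.Str.find s "." = (p0.toList.length : Int) := by
        rw [PySem.Str.find_eq]
        rw [show ("." : String).toList = ['.'] from rfl]
        rw [pvFindDot, if_pos hdotmem, ← hhd]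
      have hlens : PySem.Str.len s = (p0.toList.length : Int) + 1 + (p1.toList.length : Int) := by
        rw [PySem.Str.len_eq, hcs]
        simp [List.length_append]
        ring
      have harith : PySem.Str.len s - PySem.Str.find s "." - 1 = (p1.toList.length : Int) := by
        rw [hfind, hlens]; ring
      have hget1 : (PySem.List.pyGet? [p0, p1] (1 : Int)).getD "" = p1 := by
        simp [PySem.List.pyGet?, PySem.List.pyIdx?]
      have hget0 : (PySem.List.pyGet? [p0, p1] (0 : Int)).getD "" = p0 := by
        simp [PySem.List.pyGet?, PySem.List.pyIdx?]
      unfold pvA6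
      rw [if_pos (by simp)]
      rw [hget1, hget0, PySem.Str.len_eq]
      by_cases hin : (p1.toList.length : Int) = 7 ∨ (p1.toList.length : Int) = 8 ∨
          (p1.toList.length : Int) = 10 ∨ (p1.toList.length : Int) = 11
      · rw [if_pos (by simp only [Bool.or_eq_true, beq_iff_eq]; tauto)]
        rw [if_pos (by
          simp only [Bool.and_eq_true, Bool.or_eq_true, beq_iff_eq]
          rw [hcnt, harith]
          exact ⟨h1, by tauto⟩)]
        have hslice : (PySem.Str.slice s none (some (PySem.Str.find s "."))).toList = p0.toList := by
          rw [PySem.Str.toList_slice, PySem.Chars.slice_eq_listSlice, hfind,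
            PySem.List.slice_to _ (Int.natCast_nonneg _), hcs]
          simp
        exact (String.toList_injective hslice).symm
      · rw [if_neg (by simp only [Bool.or_eq_true, beq_iff_eq]; tauto)]
        rw [if_neg (by
          simp only [Bool.and_eq_true, Bool.or_eq_true, beq_iff_eq]
          rintro ⟨-, hd⟩
          rw [harith] at hd
          tauto)]
        show PySem.Str.strip (PySem.Str.join "." [p0, p1]) = PySem.Str.strip s
        rw [hjoin]
    · -- not exactly one dot
      have hlen2 : parts.length ≠ 2 := by
        have h := congrArg List.length hparts
        rw [pvSplitD_length] at h
        simp at h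
        omega
      unfold pvA6
      rw [if_neg (by simpa using hlen2)]
      rw [if_neg (by
        simp only [Bool.and_eq_true, beq_iff_eq]
        rintro ⟨hc, -⟩
        rw [hcnt] at hc
        exact h1 hc)]
      show PySem.Str.strip (PySem.Str.join "." parts) = PySem.Str.strip s
      rw [hjoin]

-- B's pop-of-trailing-dot block over the scanned characters equals A's fourth pass
theorem pvMkA4 (u : String) (C : List Char) (hC : C = u.toList) :
    (String.ofList (if decide (0 < PySem.List.len C) && (PySem.List.pyGet? C (-1) == some '.')
        then PySem.List.slice C none (some (-1)) else C)) = pvA4 u := by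
  subst hC
  unfold pvA4
  have hcond : (decide (0 < PySem.Str.len u) && (PySem.Str.pyGet? u (-1) == some '.')) =
      (decide (0 < PySem.List.len u.toList) && (PySem.List.pyGet? u.toList (-1) == some '.')) := by
    simp [PySem.Str.len_eq, PySem.List.len_eq]
  rw [hcond]
  split_ifs with h
  · apply String.toList_injective
    rw [PySem.Str.toList_slice, PySem.Chars.slice_eq_listSlice]
    simp
  · apply String.toList_injective
    simp

-- the full per-token equality: A's pass chain equals B's clean_token
theorem pvTokEq (t : String) :
    pvA7 (pvA6 ((PySem.Str.split? (pvA4 (PySem.Str.replace (PySem.Str.replace (pvA2 (pvA1 t)) "{" "(") "}" ")")) ".").getD [])) = pvCleanTok t := by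
  have hC : (t.toList.foldl (fun acc ch =>
      if ch == '(' then (if (PySem.Str.isIn "(" t && !PySem.Str.isIn ")" t) then acc else acc ++ [ch])
      else if ch == ')' then (if (PySem.Str.isIn ")" t && !PySem.Str.isIn "(" t) then acc else acc ++ [ch])
      else if ch == '{' then (if (PySem.Str.isIn "{" t && !PySem.Str.isIn "}" t) then acc else acc ++ ['('])
      else if ch == '}' then (if (PySem.Str.isIn "}" t && !PySem.Str.isIn "{" t) then acc else acc ++ [')'])
      else acc ++ [ch]) []) =
      (PySem.Str.replace (PySem.Str.replace (pvA2 (pvA1 t)) "{" "(") "}" ")").toList := by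
    rw [pvScan, pvStages]
    simp
  rw [pvIdRule]
  dsimp only [pvCleanTok]
  rw [pvMkA4 _ _ hC]

-- ===== VERDICT (by name: the statement is the Claim_ definition above) =====
theorem splitting_ingredient_panel_to_individual_ingredients_spec : Claim_equal_splitting_ingredient_panel_to_individual_ingredients := by
  intro col _
  unfold Spec_splitting_ingredient_panel_to_individual_ingredients
  unfold splitting_ingredient_panel_to_individual_ingredients
    splitting_ingredient_panel_to_individual_ingredients_alt
  simp only [PySem.List.foldl_append_singleton_eq_map, pvPass1, pvPass2, pvPass4, pvPass6,
    pvPass7, List.map_map, List.nil_append]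
  apply List.map_congr_left
  intro s _
  simp only [Function.comp_apply, List.map_map]
  apply List.map_congr_left
  intro t _
  simp only [Function.comp_apply]
  exact pvTokEq (PySem.Str.strip t)
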